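-- pv_equiv track=rewrite | github.com/Kohdz/Algorithms | LeetCode/medium/69_additiveNumber.py | find_rec
-- ===== SOURCE A (Python) =====
-- def find_rec(n1, n2, s, found):
--     if s == "" and found:
--         return True
--
--     n3 = str(n1 + n2)
--     idx = min(len(s), len(n3))
--
--     if s[0:idx] == n3:
--         return find_rec(n2, int(n3), s[idx:], True)
--     return False
-- ===== SOURCE B (Python) =====
-- def find_rec(n1, n2, s, found):
--     # Generate the expected continuation up front and compare once,
--     # instead of consuming s chunk-by-chunk recursively.
--     if s == "":
--         return found
--     expected = ""
--     a, b = n1, n2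
--     while len(expected) < len(s):
--         a, b = b, a + b
--         expected += str(b)
--     return expected == s
-- ===== Notes on version B (the rewrite author's own statement) =====
-- stated objective: alternative
-- what changed: Replaces the consume-a-prefix-per-step recursion with a generate-then-compare algorithm: build the expected continuation string up front until it reaches len(s), then do a single equality test (empty s reduces to returning found).
import Mathlib
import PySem

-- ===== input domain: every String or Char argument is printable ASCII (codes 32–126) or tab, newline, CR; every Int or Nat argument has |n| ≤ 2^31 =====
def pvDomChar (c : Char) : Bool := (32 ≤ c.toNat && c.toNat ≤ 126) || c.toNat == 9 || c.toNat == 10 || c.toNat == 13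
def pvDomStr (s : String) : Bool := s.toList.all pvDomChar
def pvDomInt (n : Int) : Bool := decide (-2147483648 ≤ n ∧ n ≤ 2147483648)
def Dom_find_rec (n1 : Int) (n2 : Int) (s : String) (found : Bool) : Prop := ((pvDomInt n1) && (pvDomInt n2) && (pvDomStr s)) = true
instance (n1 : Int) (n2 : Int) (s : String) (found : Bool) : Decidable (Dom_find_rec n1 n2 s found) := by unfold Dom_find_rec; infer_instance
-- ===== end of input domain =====

-- B replaces A's consume-a-prefix-per-step recursion by generating the expected
-- continuation string up front and comparing once (alternative decomposition, same cost).


-- str(n) is nonempty: needed for termination of both ports.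
theorem pv_toDigitsCore_len (b : Nat) : ∀ (f n : Nat) (acc : List Char),
    acc.length ≤ (Nat.toDigitsCore b f n acc).length := by
  intro f
  induction f with
  | zero => intro n acc; simp [Nat.toDigitsCore]
  | succ f ih =>
    intro n acc
    simp only [Nat.toDigitsCore]
    split
    · simp
    · exact le_trans (by simp) (ih _ _)

theorem pv_toDigitsCore_pos (b f n : Nat) (acc : List Char) :
    0 < (Nat.toDigitsCore b (f + 1) n acc).length := by
  simp only [Nat.toDigitsCore]
  split
  · simp
  · exact lt_of_lt_of_le (by simp) (pv_toDigitsCore_len b _ _ _)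

theorem pv_toChars_ne_nil (n : Int) : PySem.Int.toChars n ≠ [] := by
  have h10 : ∀ m : Nat, Nat.toDigits 10 m ≠ [] := fun m =>
    List.ne_nil_of_length_pos (pv_toDigitsCore_pos 10 m m [])
  unfold PySem.Int.toChars
  split
  · simp
  · exact h10 _

theorem pv_toChars_len_pos (n : Int) : 0 < (PySem.Int.toChars n).length :=
  List.length_pos_iff.mpr (pv_toChars_ne_nil n)

-- ===== PORT A =====
-- A's recursion, on the characters of s.  Python's n3 = str(n1+n2) is
-- PySem.Int.toChars (n1+n2) (written inline), idx = min(len(s), len(n3)),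
-- and s[0:idx] / s[idx:] with 0 ≤ idx ≤ len(s) are exactly List.take / List.drop.
-- `int(n3)` with n3 = str(n1+n2): int∘str is the identity on Python ints, ported
-- as the integer n1+n2 itself (exact).
def find_rec_go (n1 : Int) (n2 : Int) (s : List Char) (found : Bool) : Bool :=
  if s = [] ∧ found = true then true
  else
    if s.take (min s.length (PySem.Int.toChars (n1 + n2)).length) = PySem.Int.toChars (n1 + n2) then
      find_rec_go n2 (n1 + n2) (s.drop (min s.length (PySem.Int.toChars (n1 + n2)).length)) true
    else false
termination_by s.length
decreasing_by
  rename_i hmatch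
  have hpos : 0 < (PySem.Int.toChars (n1 + n2)).length := pv_toChars_len_pos _
  have hlen : (PySem.Int.toChars (n1 + n2)).length ≤ s.length := by
    by_contra hgt
    push_neg at hgt
    have hmin : min s.length (PySem.Int.toChars (n1 + n2)).length = s.length := by omega
    rw [hmin, List.take_length] at hmatch
    have := congrArg List.length hmatch
    omega
  simp only [List.length_drop]
  omega

def find_rec (n1 : Int) (n2 : Int) (s : String) (found : Bool) : Bool :=
  find_rec_go n1 n2 s.toList found

-- ===== PORT B =====
-- B's loop: extend `expected` with str of successive sums until it reaches len(s).
def build_expected (a : Int) (b : Int) (target : Nat) (expected : List Char) : List Char :=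
  if expected.length < target then
    build_expected b (a + b) target (expected ++ PySem.Int.toChars (a + b))
  else expected
termination_by target - expected.length
decreasing_by
  have hpos : 0 < (PySem.Int.toChars (a + b)).length := pv_toChars_len_pos _
  simp only [List.length_append]
  omega

def find_rec_alt (n1 : Int) (n2 : Int) (s : String) (found : Bool) : Bool :=
  if s.toList = [] then found
  else decide (build_expected n1 n2 s.toList.length [] = s.toList)

-- ===== PRECONDITION & SPEC =====
def Spec_find_rec (n1 : Int) (n2 : Int) (s : String) (found : Bool) (out : Bool) : Prop := out = find_rec_alt n1 n2 s found
instance (n1 : Int) (n2 : Int) (s : String) (found : Bool) (out : Bool) : Decidable (Spec_find_rec n1 n2 s found out) := by unfold Spec_find_rec; infer_instance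

-- ===== CLAIM (what is proved, stated in full; the proofs are below) =====
def Claim_equal_find_rec : Prop := ∀ (n1 : Int) (n2 : Int) (s : String) (found : Bool), Dom_find_rec n1 n2 s found → Spec_find_rec n1 n2 s found (find_rec n1 n2 s found)

-- ===== LEMMAS AND PROOFS =====

-- `expected` is always a prefix of the built string.
theorem build_expected_prefix (a b : Int) (target : Nat) (expected : List Char) :
    expected <+: build_expected a b target expected := by
  rw [build_expected]
  split
  · exact (List.prefix_append _ _).trans (build_expected_prefix _ _ _ _)
  · exact List.prefix_refl _
termination_by target - expected.length
decreasing_by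
  have hpos : 0 < (PySem.Int.toChars (a + b)).length := pv_toChars_len_pos _
  simp only [List.length_append]
  omega

-- On the empty string A's recursion returns `found`.
theorem find_rec_go_nil (n1 n2 : Int) (found : Bool) :
    find_rec_go n1 n2 [] found = found := by
  rw [find_rec_go]
  have hne := pv_toChars_ne_nil (n1 + n2)
  cases found <;> simp [hne.symm]

-- Main bridge: the consume recursion (with found = true) equals the
-- generate-then-compare test, for any already-matched prefix p.
theorem find_rec_go_eq_build (s : List Char) (p : List Char) (n1 n2 : Int) :
    find_rec_go n1 n2 s true = decide (build_expected n1 n2 (p ++ s).length p = p ++ s) := by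
  rcases eq_or_ne s [] with rfl | hs
  · rw [find_rec_go_nil, build_expected]
    simp
  · rw [find_rec_go, build_expected]
    have hslen : 0 < s.length := List.length_pos_iff.mpr hs
    have hcond : p.length < (p ++ s).length := by simp; omega
    have hne : ¬(s = [] ∧ true = true) := by simp [hs]
    have hn3pos : 0 < (PySem.Int.toChars (n1 + n2)).length := pv_toChars_len_pos _
    rw [if_neg hne, if_pos hcond]
    by_cases hmatch :
        s.take (min s.length (PySem.Int.toChars (n1 + n2)).length) = PySem.Int.toChars (n1 + n2)
    · -- the next chunk matches: peel it off on both sides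
      have hlen : (PySem.Int.toChars (n1 + n2)).length ≤ s.length := by
        by_contra hgt
        push_neg at hgt
        have hmin : min s.length (PySem.Int.toChars (n1 + n2)).length = s.length := by omega
        rw [hmin, List.take_length] at hmatch
        have := congrArg List.length hmatch
        omega
      have hidx : min s.length (PySem.Int.toChars (n1 + n2)).length
          = (PySem.Int.toChars (n1 + n2)).length := by omega
      rw [if_pos hmatch, hidx]
      have hsplit : s = PySem.Int.toChars (n1 + n2)
          ++ s.drop (PySem.Int.toChars (n1 + n2)).length := by
        conv_lhs => rw [← List.take_append_drop (PySem.Int.toChars (n1 + n2)).length s]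
        rw [← hidx, hmatch]
      rw [find_rec_go_eq_build (s.drop (PySem.Int.toChars (n1 + n2)).length)
        (p ++ PySem.Int.toChars (n1 + n2)) n2 (n1 + n2)]
      congr 2 <;> rw [List.append_assoc, ← hsplit]
    · rw [if_neg hmatch]
      symm
      simp only [decide_eq_false_iff_not]
      intro heq
      -- p ++ str(n1+n2) is a prefix of the built string, which equals p ++ s
      have hpre : p ++ PySem.Int.toChars (n1 + n2) <+: p ++ s :=
        heq ▸ build_expected_prefix n2 (n1 + n2) _ _
      have hlen3 : (PySem.Int.toChars (n1 + n2)).length ≤ s.length := by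
        have := hpre.length_le
        simp at this
        omega
      have htake : s.take (PySem.Int.toChars (n1 + n2)).length = PySem.Int.toChars (n1 + n2) := by
        have h2 := (List.prefix_append_right_inj p).mp hpre
        exact (List.prefix_iff_eq_take.mp h2).symm
      exact hmatch (by rwa [min_eq_right hlen3])
termination_by s.length
decreasing_by
  simp only [List.length_drop]
  omega

-- `found` only matters on the empty string.
theorem find_rec_go_found (n1 n2 : Int) (s : List Char) (found : Bool) (hs : s ≠ []) :
    find_rec_go n1 n2 s found = find_rec_go n1 n2 s true := by
  conv_lhs => rw [find_rec_go]
  conv_rhs => rw [find_rec_go]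
  simp only [hs, false_and, if_false]

-- ===== VERDICT (by name: the statement is the Claim_ definition above) =====
theorem find_rec_spec : Claim_equal_find_rec := by
  intro n1 n2 s found _
  unfold Spec_find_rec find_rec find_rec_alt
  rcases eq_or_ne s.toList [] with h | h
  · rw [if_pos h, h, find_rec_go_nil]
  · rw [if_neg h, find_rec_go_found n1 n2 _ found h,
      find_rec_go_eq_build s.toList [] n1 n2]
    simp
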